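-- pv_equiv track=rewrite | github.com/Cameron-L-Thorp/PythonExperimental | CodeAcademyProjects/ChallengesCodeAcademy.py | within_range
-- ===== SOURCE A (Python) =====
-- def within_range(low, high, target):
--     #Inefficient, but I want to try it
--     num_list = list(range(low, (high + 1)))
--     for num in num_list:
--         if num == target:
--             return True
--         else:
--             continue
--     return False
-- ===== SOURCE B (Python) =====
-- def within_range(low, high, target):
--     return low <= target <= high
-- ===== Notes on version B (the rewrite author's own statement) =====
-- stated objective: simpler
-- what changed: Replaced materialising list(range(low, high+1)) and linearly scanning it for target by the direct chained comparison low <= target <= high.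
import Mathlib
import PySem

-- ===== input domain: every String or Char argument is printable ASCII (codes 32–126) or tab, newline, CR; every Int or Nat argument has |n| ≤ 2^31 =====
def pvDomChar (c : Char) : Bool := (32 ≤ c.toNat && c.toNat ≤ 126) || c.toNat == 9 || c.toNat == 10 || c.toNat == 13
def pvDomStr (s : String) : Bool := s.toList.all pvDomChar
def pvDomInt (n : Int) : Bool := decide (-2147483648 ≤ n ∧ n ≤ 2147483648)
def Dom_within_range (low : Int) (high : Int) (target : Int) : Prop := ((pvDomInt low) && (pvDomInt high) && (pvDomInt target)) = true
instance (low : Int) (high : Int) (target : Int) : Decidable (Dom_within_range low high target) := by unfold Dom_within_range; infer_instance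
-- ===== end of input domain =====

-- B replaces A's linear scan over list(range(low, high+1)) by the direct chained
-- comparison low <= target <= high (objective: simpler).
-- ===== PORT A =====
-- 'for num in num_list: if num == target: return True else continue' / 'return False'
def withinLoopA (t : Int) : List Int → Bool
  | [] => false
  | n :: rest => if n == t then true else withinLoopA t rest

def within_range (low : Int) (high : Int) (target : Int) : Bool :=
  withinLoopA target (PySem.List.pyRange low (high + 1) 1)

-- ===== PORT B =====
def within_range_alt (low : Int) (high : Int) (target : Int) : Bool :=
  decide (low ≤ target ∧ target ≤ high)

-- ===== PRECONDITION & SPEC =====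
def Spec_within_range (low : Int) (high : Int) (target : Int) (out : Bool) : Prop := out = within_range_alt low high target
instance (low : Int) (high : Int) (target : Int) (out : Bool) : Decidable (Spec_within_range low high target out) := by unfold Spec_within_range; infer_instance

-- ===== CLAIM (what is proved, stated in full; the proofs are below) =====
def Claim_equal_within_range : Prop := ∀ (low : Int) (high : Int) (target : Int), Dom_within_range low high target → Spec_within_range low high target (within_range low high target)

-- ===== LEMMAS AND PROOFS =====

-- ===== VERDICT (by name: the statement is the Claim_ definition above) =====
theorem withinLoopA_eq_true_iff (t : Int) (xs : List Int) :
    withinLoopA t xs = true ↔ t ∈ xs := by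
  induction xs with
  | nil => simp [withinLoopA]
  | cons n rest ih =>
      simp only [withinLoopA, List.mem_cons]
      by_cases h : n = t
      · simp [h]
      · have h2 : ¬ t = n := fun e => h e.symm
        simp [h, h2, ih]

theorem within_range_spec : Claim_equal_within_range := by
  intro low high target _
  unfold Spec_within_range within_range within_range_alt
  by_cases h : low ≤ target ∧ target ≤ high
  · have hm : target ∈ PySem.List.pyRange low (high + 1) 1 :=
      (PySem.List.mem_pyRange_one).2 ⟨h.1, by omega⟩
    simp [(withinLoopA_eq_true_iff _ _).2 hm, h]
  · have hm : target ∉ PySem.List.pyRange low (high + 1) 1 := fun m => by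
      have := (PySem.List.mem_pyRange_one).1 m
      exact h ⟨this.1, by omega⟩
    have hf : withinLoopA target (PySem.List.pyRange low (high + 1) 1) = false := by
      rw [← Bool.not_eq_true, withinLoopA_eq_true_iff]; exact hm
    simp [hf, h]
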